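-- pv_equiv track=rewrite | github.com/edulinq/lms-toolkit | lms/util/tsv.py | _match_header_row
-- ===== SOURCE A (Python) =====
-- import typing
--
-- def _match_header_row(
--         parts: typing.List[str],
--         expected_columns: typing.List[str],
--         required_columns: typing.List[str],
--         ) -> typing.Union[typing.Dict[str, typing.Union[int, None]], None]:
--     """ Return a column index map if all required columns match, else None. """
--
--     normalized_expected = {col.lower(): col for col in expected_columns}
--     normalized_required = {col.lower() for col in required_columns}
--
--     header_map: typing.Dict[str, typing.Union[int, None]] = {}
--     found = set()
--
--     for col in expected_columns:
--         header_map[col] = None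
--
--     for i, part in enumerate(parts):
--         normalized = part.lower()
--
--         if (normalized in normalized_expected):
--             header_map[normalized_expected[normalized]] = i
--             found.add(normalized)
--
--     if (normalized_required.issubset(found)):
--         return header_map
--
--     return None
-- ===== SOURCE B (Python) =====
-- import typing
--
-- def _match_header_row(
--         parts: typing.List[str],
--         expected_columns: typing.List[str],
--         required_columns: typing.List[str],
--         ) -> typing.Union[typing.Dict[str, typing.Union[int, None]], None]:
--     """ Return a column index map if all required columns match, else None. """
--
--     part_index = {}
--     for i, part in enumerate(parts):
--         part_index[part.lower()] = i
--
--     expected_lower = {col.lower() for col in expected_columns}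
--
--     for col in required_columns:
--         normalized = col.lower()
--         if (normalized not in part_index) or (normalized not in expected_lower):
--             return None
--
--     return {col: part_index.get(col.lower()) for col in expected_columns}
-- ===== Notes on version B (the rewrite author's own statement) =====
-- stated objective: alternative
-- what changed: A scans the header parts writing indices into a pre-initialized map while tracking a 'found' set and ends with a subset test; B inverts the traversal: it indexes the parts by lowercased value once, early-returns None as soon as a required column is missing, and only then fills the map by direct lookup per expected column. Pre_ excludes expected-column lists containing distinct case-variant duplicates, where A's last-wins dict-key normalization is accidental.
-- outside the precondition, e.g. on _match_header_row(['A'], ['a', 'A'], []): A returns {'a': None, 'A': 0}, B returns {'a': 0, 'A': 0}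
import Mathlib
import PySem

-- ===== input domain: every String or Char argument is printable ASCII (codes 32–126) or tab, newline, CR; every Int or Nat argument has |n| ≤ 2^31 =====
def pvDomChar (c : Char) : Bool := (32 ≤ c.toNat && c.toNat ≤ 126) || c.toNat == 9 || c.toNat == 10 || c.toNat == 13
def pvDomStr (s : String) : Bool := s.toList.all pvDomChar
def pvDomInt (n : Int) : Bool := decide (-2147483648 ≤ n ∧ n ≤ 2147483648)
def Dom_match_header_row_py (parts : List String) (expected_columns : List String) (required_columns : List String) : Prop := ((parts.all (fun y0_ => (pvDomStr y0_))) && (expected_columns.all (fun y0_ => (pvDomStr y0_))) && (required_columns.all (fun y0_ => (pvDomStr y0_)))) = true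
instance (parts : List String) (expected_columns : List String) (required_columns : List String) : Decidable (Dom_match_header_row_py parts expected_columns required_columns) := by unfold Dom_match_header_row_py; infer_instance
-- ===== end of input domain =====

-- B inverts A's traversal: it indexes the parts by lowercased value once, early-returns None on a
-- missing required column, and fills the map by direct lookup per expected column (alternative decomposition).

-- ===== PORT A =====
def match_header_row_py (parts : List String) (expected_columns : List String) (required_columns : List String) : Option (List (String × Option Int)) :=
  let normalized_expected : PySem.Dict String String :=
    expected_columns.foldl (fun d col => d.insert (PySem.Str.lower col) col) PySem.Dict.empty
  let normalized_required : PySem.Set String :=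
    PySem.Set.ofList (required_columns.map (fun col => PySem.Str.lower col))
  let header_map : PySem.Dict String (Option Int) :=
    expected_columns.foldl (fun d col => d.insert col none) PySem.Dict.empty
  let found : PySem.Set String := PySem.Set.empty
  let st :=
    (PySem.List.enumerate parts 0).foldl
      (fun (st : PySem.Dict String (Option Int) × PySem.Set String) p =>
        match normalized_expected.get? (PySem.Str.lower p.2) with
        | some orig => (st.1.insert orig (some p.1), PySem.Set.add st.2 (PySem.Str.lower p.2))
        | none => st)
      (header_map, found)
  if PySem.Set.issubset normalized_required st.2 then some st.1.items else none

-- ===== PORT B =====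
def match_header_row_py_alt (parts : List String) (expected_columns : List String) (required_columns : List String) : Option (List (String × Option Int)) :=
  let part_index : PySem.Dict String Int :=
    (PySem.List.enumerate parts 0).foldl (fun d p => d.insert (PySem.Str.lower p.2) p.1) PySem.Dict.empty
  let expected_lower : PySem.Set String :=
    PySem.Set.ofList (expected_columns.map (fun col => PySem.Str.lower col))
  -- the required-columns loop with early `return None` = an all-check deciding which branch returns
  if required_columns.all (fun col =>
      part_index.contains (PySem.Str.lower col) &&
      PySem.Set.contains expected_lower (PySem.Str.lower col))
  then
    some ((expected_columns.foldl
      (fun d col => d.insert col (part_index.get? (PySem.Str.lower col)))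
      PySem.Dict.empty).items)
  else none

-- ===== PRECONDITION & SPEC =====
-- Pre_ excludes expected-column lists containing two distinct case-variant spellings of the same
-- name (e.g. "a" and "A"), a corner where A's map keeps the earlier spelling mapped to None only
-- because the later one overwrote it in A's lowercase-keyed dict — a last-wins accident of dict
-- re-insertion that no caller would specify; B there naturally indexes every spelling.
def Pre_match_header_row_py (parts : List String) (expected_columns : List String) (required_columns : List String) : Prop :=
  ∀ a ∈ expected_columns, ∀ b ∈ expected_columns,
    PySem.Str.lower a = PySem.Str.lower b → a = b
instance (parts : List String) (expected_columns : List String) (required_columns : List String) : Decidable (Pre_match_header_row_py parts expected_columns required_columns) := by unfold Pre_match_header_row_py; infer_instance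

def pvWitness_match_header_row_py : List String × List String × List String :=
  (["ID", "Email"], ["id", "name", "email"], ["id", "email"])

def Spec_match_header_row_py (parts : List String) (expected_columns : List String) (required_columns : List String) (out : Option (List (String × Option Int))) : Prop := out = match_header_row_py_alt parts expected_columns required_columns
instance (parts : List String) (expected_columns : List String) (required_columns : List String) (out : Option (List (String × Option Int))) : Decidable (Spec_match_header_row_py parts expected_columns required_columns out) := by unfold Spec_match_header_row_py; infer_instance

-- ===== CLAIM (what is proved, stated in full; the proofs are below) =====
def Claim_equal_match_header_row_py : Prop := ∀ (parts : List String) (expected_columns : List String) (required_columns : List String), Dom_match_header_row_py parts expected_columns required_columns → Pre_match_header_row_py parts expected_columns required_columns → Spec_match_header_row_py parts expected_columns required_columns (match_header_row_py parts expected_columns required_columns)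

-- ===== LEMMAS AND PROOFS =====

lemma mhr_ne_sound (E : List String) : ∀ (d : PySem.Dict String String) (n c : String),
    (E.foldl (fun d col => d.insert (PySem.Str.lower col) col) d).get? n = some c →
    d.get? n = some c ∨ (c ∈ E ∧ PySem.Str.lower c = n) := by
  induction E with
  | nil => intro d n c h; exact Or.inl h
  | cons x xs ih =>
    intro d n c h
    rcases ih _ _ _ h with h' | h'
    · rw [PySem.Dict.get?_insert] at h'
      split at h'
      · rename_i hn
        cases Option.some_inj.mp h'
        exact Or.inr ⟨List.mem_cons_self, hn.symm⟩
      · exact Or.inl h'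
    · exact Or.inr ⟨List.mem_cons_of_mem _ h'.1, h'.2⟩

lemma mhr_init_getD (E : List String) : ∀ (d : PySem.Dict String (Option Int)),
    (∀ k, d.getD k none = none) → ∀ k, (E.foldl (fun d col => d.insert col none) d).getD k none = none := by
  induction E with
  | nil => intro d h k; exact h k
  | cons x xs ih =>
    intro d h k
    refine ih _ (fun k' => ?_) k
    rw [PySem.Dict.getD_insert]
    split
    · rfl
    · exact h k'

lemma mhr_pair_fold (D : PySem.Dict String String) :
    ∀ (ps : List (Int × String)) (hm : PySem.Dict String (Option Int)) (fd : PySem.Set String),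
    ps.foldl
      (fun (st : PySem.Dict String (Option Int) × PySem.Set String) p =>
        match D.get? (PySem.Str.lower p.2) with
        | some orig => (st.1.insert orig (some p.1), PySem.Set.add st.2 (PySem.Str.lower p.2))
        | none => st)
      (hm, fd)
    = (ps.foldl
        (fun hm p =>
          match D.get? (PySem.Str.lower p.2) with
          | some orig => hm.insert orig (some p.1)
          | none => hm) hm,
       ps.foldl
        (fun fd p =>
          match D.get? (PySem.Str.lower p.2) with
          | some _ => PySem.Set.add fd (PySem.Str.lower p.2)
          | none => fd) fd) := by
  intro ps
  induction ps with
  | nil => intro hm fd; rfl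
  | cons p ps ih =>
    intro hm fd
    simp only [List.foldl_cons]
    cases D.get? (PySem.Str.lower p.2) with
    | some orig => exact ih _ _
    | none => exact ih _ _

lemma mhr_insert_fold_contains :
    ∀ (ps : List (Int × String)) (d : PySem.Dict String Int) (n : String),
    d.contains n = true →
    (ps.foldl (fun d p => d.insert (PySem.Str.lower p.2) p.1) d).contains n = true := by
  intro ps
  induction ps with
  | nil => intro d n h; exact h
  | cons p ps ih =>
    intro d n h
    simp only [List.foldl_cons]
    refine ih _ _ ?_
    rw [PySem.Dict.contains_insert, h]
    simp

lemma mhr_loopA_getD (D : PySem.Dict String String)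
    (hD : ∀ n c, D.get? n = some c → PySem.Str.lower c = n) :
    ∀ (ps : List (Int × String)) (hm : PySem.Dict String (Option Int)) (d : PySem.Dict String Int),
    (∀ k i, D.get? (PySem.Str.lower k) = some k → d.get? (PySem.Str.lower k) = some i → hm.getD k none = some i) →
    ∀ k, (ps.foldl
        (fun hm p =>
          match D.get? (PySem.Str.lower p.2) with
          | some orig => hm.insert orig (some p.1)
          | none => hm) hm).getD k none
      = if D.get? (PySem.Str.lower k) = some k then
          match (ps.foldl (fun d p => d.insert (PySem.Str.lower p.2) p.1) d).get? (PySem.Str.lower k) with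
          | some i => some i
          | none => hm.getD k none
        else hm.getD k none := by
  intro ps
  induction ps with
  | nil =>
    intro hm d hcomp k
    simp only [List.foldl_nil]
    split
    · rename_i hk
      cases hd : d.get? (PySem.Str.lower k) with
      | some i => exact hcomp k i hk hd
      | none => rfl
    · rfl
  | cons p ps ih =>
    intro hm d hcomp k
    simp only [List.foldl_cons]
    cases hp : D.get? (PySem.Str.lower p.2) with
    | none =>
      refine ih hm _ (fun k i hk hd => ?_) k
      rw [PySem.Dict.get?_insert] at hd
      split at hd
      · rename_i he
        rw [he] at hk
        rw [hk] at hp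
        cases hp
      · exact hcomp k i hk hd
    | some orig =>
      have horig : PySem.Str.lower orig = PySem.Str.lower p.2 := hD _ _ hp
      have hcomp' : ∀ k i, D.get? (PySem.Str.lower k) = some k →
          (d.insert (PySem.Str.lower p.2) p.1).get? (PySem.Str.lower k) = some i →
          (hm.insert orig (some p.1)).getD k none = some i := by
        intro k i hk hd
        rw [PySem.Dict.get?_insert] at hd
        rw [PySem.Dict.getD_insert]
        split at hd
        · rename_i he
          rw [he] at hk
          rw [hk] at hp
          cases Option.some_inj.mp hp
          cases Option.some_inj.mp hd
          simp
        · rename_i he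
          split
          · rename_i hko
            exact absurd (by rw [hko, horig]) he
          · exact hcomp k i hk hd
      rw [show (match some orig with
          | some orig => hm.insert orig (some p.1)
          | none => hm) = hm.insert orig (some p.1) from rfl]
      rw [ih (hm.insert orig (some p.1)) (d.insert (PySem.Str.lower p.2) p.1) hcomp' k]
      split
      · rename_i hk
        cases hg : (ps.foldl (fun d p => d.insert (PySem.Str.lower p.2) p.1)
            (d.insert (PySem.Str.lower p.2) p.1)).get? (PySem.Str.lower k) with
        | some i => rfl
        | none =>
          have hne : PySem.Str.lower k ≠ PySem.Str.lower p.2 := by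
            intro he
            have hc : (d.insert (PySem.Str.lower p.2) p.1).contains (PySem.Str.lower k) = true := by
              rw [he]; exact PySem.Dict.contains_insert_self _ _ _
            have hcc := mhr_insert_fold_contains ps _ _ hc
            rw [PySem.Dict.contains_eq_isSome_get?, hg] at hcc
            cases hcc
          show (hm.insert orig (some p.1)).getD k none = hm.getD k none
          rw [PySem.Dict.getD_insert]
          split
          · rename_i hko
            exact absurd (by rw [hko, horig]) hne
          · rfl
      · rename_i hk
        rw [PySem.Dict.getD_insert]
        split
        · rename_i hko
          rw [hko, horig] at hk
          exact absurd hp hk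
        · rfl

lemma mhr_loopA_keys (D : PySem.Dict String String) :
    ∀ (ps : List (Int × String)) (hm : PySem.Dict String (Option Int)),
    (∀ n c, D.get? n = some c → hm.contains c = true) →
    (ps.foldl
        (fun hm p =>
          match D.get? (PySem.Str.lower p.2) with
          | some orig => hm.insert orig (some p.1)
          | none => hm) hm).keys = hm.keys := by
  intro ps
  induction ps with
  | nil => intro hm _; rfl
  | cons p ps ih =>
    intro hm h
    simp only [List.foldl_cons]
    cases hp : D.get? (PySem.Str.lower p.2) with
    | none => exact ih hm h
    | some orig =>
      have hc : hm.contains orig = true := h _ _ hp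
      rw [ih _ (fun n c hnc => ?_), PySem.Dict.keys_insert_of_contains _ _ hc]
      rw [PySem.Dict.contains_insert]
      rw [h _ _ hnc]
      simp

lemma mhr_found_mem (D : PySem.Dict String String) :
    ∀ (ps : List (Int × String)) (fd : PySem.Set String) (n : String),
    (n ∈ ps.foldl
        (fun fd p =>
          match D.get? (PySem.Str.lower p.2) with
          | some _ => PySem.Set.add fd (PySem.Str.lower p.2)
          | none => fd) fd)
    ↔ n ∈ fd ∨ ((∃ p ∈ ps, PySem.Str.lower p.2 = n) ∧ (D.get? n).isSome) := by
  intro ps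
  induction ps with
  | nil => intro fd n; simp
  | cons p ps ih =>
    intro fd n
    simp only [List.foldl_cons]
    cases hp : D.get? (PySem.Str.lower p.2) with
    | none =>
      rw [ih]
      constructor
      · rintro (h | ⟨⟨q, hq, hqn⟩, hs⟩)
        · exact Or.inl h
        · exact Or.inr ⟨⟨q, List.mem_cons_of_mem _ hq, hqn⟩, hs⟩
      · rintro (h | ⟨⟨q, hq, hqn⟩, hs⟩)
        · exact Or.inl h
        · rcases List.mem_cons.mp hq with rfl | hq'
          · rw [hqn] at hp; rw [hp] at hs; cases hs
          · exact Or.inr ⟨⟨q, hq', hqn⟩, hs⟩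
    | some c =>
      rw [ih, PySem.Set.mem_add]
      constructor
      · rintro ((h | rfl) | ⟨⟨q, hq, hqn⟩, hs⟩)
        · exact Or.inl h
        · exact Or.inr ⟨⟨p, List.mem_cons_self, rfl⟩, by rw [hp]; rfl⟩
        · exact Or.inr ⟨⟨q, List.mem_cons_of_mem _ hq, hqn⟩, hs⟩
      · rintro (h | ⟨⟨q, hq, hqn⟩, hs⟩)
        · exact Or.inl (Or.inl h)
        · rcases List.mem_cons.mp hq with rfl | hq'
          · exact Or.inl (Or.inr hqn.symm)
          · exact Or.inr ⟨⟨q, hq', hqn⟩, hs⟩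

lemma mhr_loopB_getD (f : String → Option Int) :
    ∀ (E : List String) (d : PySem.Dict String (Option Int)) (k : String),
    (E.foldl (fun d col => d.insert col (f col)) d).getD k none
    = if k ∈ E then f k else d.getD k none := by
  intro E
  induction E with
  | nil => intro d k; simp
  | cons x xs ih =>
    intro d k
    simp only [List.foldl_cons, ih, PySem.Dict.getD_insert]
    by_cases hx : k = x <;> by_cases hxs : k ∈ xs <;> simp [hx, hxs]

-- ===== VERDICT (by name: the statement is the Claim_ definition above) =====
theorem match_header_row_py_spec : Claim_equal_match_header_row_py := by
  intro parts E R _ hpre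
  unfold Spec_match_header_row_py
  show match_header_row_py parts E R = match_header_row_py_alt parts E R
  simp only [match_header_row_py, match_header_row_py_alt]
  rw [mhr_pair_fold]
  set NE : PySem.Dict String String :=
    E.foldl (fun d col => d.insert (PySem.Str.lower col) col) PySem.Dict.empty with hNEdef
  set PI : PySem.Dict String Int :=
    (PySem.List.enumerate parts 0).foldl (fun d p => d.insert (PySem.Str.lower p.2) p.1) PySem.Dict.empty with hPIdef
  set H0 : PySem.Dict String (Option Int) :=
    E.foldl (fun d col => d.insert col none) PySem.Dict.empty with hH0def
  set fB : String → Option Int := fun col => PI.get? (PySem.Str.lower col) with hfBdef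
  set AH : PySem.Dict String (Option Int) :=
    (PySem.List.enumerate parts 0).foldl
      (fun hm p =>
        match NE.get? (PySem.Str.lower p.2) with
        | some orig => hm.insert orig (some p.1)
        | none => hm) H0 with hAHdef
  set BH : PySem.Dict String (Option Int) :=
    E.foldl (fun d col => d.insert col (fB col)) PySem.Dict.empty with hBHdef
  set found : PySem.Set String :=
    (PySem.List.enumerate parts 0).foldl
      (fun fd p =>
        match NE.get? (PySem.Str.lower p.2) with
        | some _ => PySem.Set.add fd (PySem.Str.lower p.2)
        | none => fd) PySem.Set.empty with hfounddef
  -- basic facts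
  have hDsound : ∀ n c, NE.get? n = some c → c ∈ E ∧ PySem.Str.lower c = n := by
    intro n c h
    rcases mhr_ne_sound E _ _ _ h with h' | h'
    · rw [PySem.Dict.get?_empty] at h'; cases h'
    · exact h'
  have hD : ∀ n c, NE.get? n = some c → PySem.Str.lower c = n := fun n c h => (hDsound n c h).2
  have hNEkeys : NE.keys = PySem.Set.ofList (E.map (fun col => PySem.Str.lower col)) := by
    have h := PySem.Dict.keys_foldl_insert_key E (fun col => PySem.Str.lower col)
      (fun _ col => col) PySem.Dict.empty
    rw [PySem.Dict.keys_empty] at h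
    exact h
  have hNEsome : ∀ n, (NE.get? n).isSome = true ↔ n ∈ E.map (fun col => PySem.Str.lower col) := by
    intro n
    rw [← PySem.Dict.contains_eq_isSome_get?, PySem.Dict.contains_eq_decide_mem_keys, hNEkeys]
    simp [PySem.Set.mem_ofList]
  -- under Pre_, the normalized-expected lookup of an expected column returns that column itself
  have hNEself : ∀ k, k ∈ E → NE.get? (PySem.Str.lower k) = some k := by
    intro k hk
    have hs : (NE.get? (PySem.Str.lower k)).isSome = true :=
      (hNEsome _).mpr (List.mem_map_of_mem hk)
    cases hg : NE.get? (PySem.Str.lower k) with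
    | none => rw [hg] at hs; cases hs
    | some c =>
      rcases hDsound _ _ hg with ⟨hcE, hcl⟩
      rw [hpre c hcE k hk hcl]
  have hH0keys : H0.keys = PySem.Set.ofList E :=
    PySem.Dict.keys_foldl_insert E (fun _ _ => (none : Option Int)) PySem.Dict.empty
  have hH0nodup : H0.keys.Nodup :=
    PySem.Dict.nodup_keys_foldl_insert E (fun _ _ => (none : Option Int)) PySem.Dict.empty
      PySem.Dict.nodup_keys_empty
  have hH0contains : ∀ n c, NE.get? n = some c → H0.contains c = true := by
    intro n c h
    rw [PySem.Dict.contains_eq_decide_mem_keys, hH0keys]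
    simp [PySem.Set.mem_ofList, (hDsound n c h).1]
  have hH0getD : ∀ k, H0.getD k none = none :=
    mhr_init_getD E PySem.Dict.empty (fun k => PySem.Dict.getD_empty k none)
  have hAkeys : AH.keys = H0.keys := mhr_loopA_keys NE _ _ hH0contains
  have hAgetD : ∀ k, AH.getD k none =
      if NE.get? (PySem.Str.lower k) = some k then
        match PI.get? (PySem.Str.lower k) with
        | some i => some i
        | none => H0.getD k none
      else H0.getD k none := by
    intro k
    exact mhr_loopA_getD NE hD (PySem.List.enumerate parts 0) H0 PySem.Dict.empty
      (fun k i _ hd => by rw [PySem.Dict.get?_empty] at hd; cases hd) k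
  have hBkeys : BH.keys = PySem.Set.ofList E :=
    PySem.Dict.keys_foldl_insert E (fun _ col => fB col) PySem.Dict.empty
  have hBnodup : BH.keys.Nodup :=
    PySem.Dict.nodup_keys_foldl_insert E (fun _ col => fB col) PySem.Dict.empty
      PySem.Dict.nodup_keys_empty
  have hBgetD : ∀ k, BH.getD k none = if k ∈ E then fB k else none := by
    intro k
    have h := mhr_loopB_getD fB E PySem.Dict.empty k
    rw [PySem.Dict.getD_empty] at h
    exact h
  have hval : ∀ k, k ∈ E → AH.getD k none = fB k := by
    intro k hk
    rw [hAgetD k, if_pos (hNEself k hk), hH0getD k,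
        show fB k = PI.get? (PySem.Str.lower k) from rfl]
    cases PI.get? (PySem.Str.lower k) <;> rfl
  -- items equality
  have hitems : AH.items = BH.items := by
    rw [PySem.Dict.items_eq_map_keys AH (by rw [hAkeys]; exact hH0nodup) none,
        PySem.Dict.items_eq_map_keys BH hBnodup none, hAkeys, hH0keys, hBkeys]
    apply List.map_congr_left
    intro k hk
    have hkE : k ∈ E := (PySem.Set.mem_ofList E k).mp hk
    rw [hval k hkE, hBgetD k, if_pos hkE]
  -- PI contains characterization
  have hPIkeys : PI.keys = PySem.Set.ofList (parts.map (fun s => PySem.Str.lower s)) := by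
    have h : PI.keys = PySem.Set.update PySem.Dict.empty.keys
        ((PySem.List.enumerate parts 0).map (fun p => PySem.Str.lower p.2)) :=
      PySem.Dict.keys_foldl_insert_key (PySem.List.enumerate parts 0)
        (fun p => PySem.Str.lower p.2) (fun _ p => p.1) PySem.Dict.empty
    rw [PySem.Dict.keys_empty] at h
    have hmap : (PySem.List.enumerate parts 0).map (fun p => PySem.Str.lower p.2)
        = parts.map (fun s => PySem.Str.lower s) := by
      rw [show (fun (p : Int × String) => PySem.Str.lower p.2)
            = (fun s => PySem.Str.lower s) ∘ (fun (p : Int × String) => p.2) from rfl,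
          ← List.map_map, PySem.List.map_snd_enumerate]
    rw [hmap] at h
    exact h
  have hPIcontains : ∀ n, PI.contains n = true ↔ ∃ s ∈ parts, PySem.Str.lower s = n := by
    intro n
    rw [PySem.Dict.contains_eq_decide_mem_keys, hPIkeys]
    simp [PySem.Set.mem_ofList]
  have hb : ∀ n, (∃ p ∈ PySem.List.enumerate parts 0, PySem.Str.lower p.2 = n)
      ↔ (∃ s ∈ parts, PySem.Str.lower s = n) := by
    intro n
    constructor
    · rintro ⟨p, hp, h⟩
      refine ⟨p.2, ?_, h⟩
      rw [← PySem.List.map_snd_enumerate parts 0]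
      exact List.mem_map_of_mem hp
    · rintro ⟨s, hs, h⟩
      rw [← PySem.List.map_snd_enumerate parts (0 : Int)] at hs
      rcases List.mem_map.mp hs with ⟨p, hp, hps⟩
      exact ⟨p, hp, by rw [hps]; exact h⟩
  have hfound : ∀ n, (n ∈ found) ↔ ((∃ s ∈ parts, PySem.Str.lower s = n) ∧ (NE.get? n).isSome) := by
    intro n
    rw [hfounddef, mhr_found_mem]
    rw [← hb n]
    simp [PySem.Set.empty]
  -- condition equality
  have hcond : PySem.Set.issubset (PySem.Set.ofList (R.map (fun col => PySem.Str.lower col))) found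
      = R.all (fun col => PI.contains (PySem.Str.lower col) &&
          PySem.Set.contains (PySem.Set.ofList (E.map (fun col => PySem.Str.lower col))) (PySem.Str.lower col)) := by
    rw [Bool.eq_iff_iff]
    simp only [PySem.Set.issubset, List.all_eq_true, PySem.Set.contains, List.contains_iff_mem]
    constructor
    · intro h col hcol
      have hm : PySem.Str.lower col ∈ PySem.Set.ofList (R.map (fun col => PySem.Str.lower col)) :=
        (PySem.Set.mem_ofList _ _).mpr (List.mem_map_of_mem hcol)
      rcases (hfound (PySem.Str.lower col)).mp (h _ hm) with ⟨hex, hsome⟩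
      rw [Bool.and_eq_true]
      refine ⟨(hPIcontains _).mpr hex, ?_⟩
      rw [List.contains_iff_mem]
      exact (PySem.Set.mem_ofList _ _).mpr ((hNEsome _).mp hsome)
    · intro h x hx
      rcases List.mem_map.mp ((PySem.Set.mem_ofList _ _).mp hx) with ⟨col, hcol, rfl⟩
      have hcb := h col hcol
      rw [Bool.and_eq_true] at hcb
      refine (hfound _).mpr ⟨(hPIcontains _).mp hcb.1, ?_⟩
      have h2 := hcb.2
      rw [List.contains_iff_mem] at h2
      exact (hNEsome _).mpr ((PySem.Set.mem_ofList _ _).mp h2)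
  rw [hcond, hitems]
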